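-- pv_equiv track=rewrite | github.com/Gautreaux/AOC-Python | Solutions2016/y2016d14.py | containsConsecutiveTriple
-- ===== SOURCE A (Python) =====
-- from typing import List
--
-- def containsConsecutiveTriple(h : str) -> List[str]:
--     toReturn = []
--     for i in range(len(h)-2):
--         c = h[i]
--         if(h[i+1] == c and h[i+2] == c and c not in toReturn):
--             toReturn.append(c)
--             return toReturn
--     return toReturn
-- ===== SOURCE B (Python) =====
-- from typing import List
--
-- def containsConsecutiveTriple(h : str) -> List[str]:
--     # single pass run-length counter: track the current run of equal chars
--     prev = None
--     run = 0
--     for c in h: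
--         if c == prev:
--             run += 1
--         else:
--             prev, run = c, 1
--         if run == 3:
--             return [c]
--     return []
-- ===== Notes on version B (the rewrite author's own statement) =====
-- stated objective: alternative
-- what changed: Replaces the indexed sliding 3-window scan (with its dead membership test on the result list) by a single run-length pass that keeps the current run's character and length and returns as soon as a run reaches 3.
import Mathlib
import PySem

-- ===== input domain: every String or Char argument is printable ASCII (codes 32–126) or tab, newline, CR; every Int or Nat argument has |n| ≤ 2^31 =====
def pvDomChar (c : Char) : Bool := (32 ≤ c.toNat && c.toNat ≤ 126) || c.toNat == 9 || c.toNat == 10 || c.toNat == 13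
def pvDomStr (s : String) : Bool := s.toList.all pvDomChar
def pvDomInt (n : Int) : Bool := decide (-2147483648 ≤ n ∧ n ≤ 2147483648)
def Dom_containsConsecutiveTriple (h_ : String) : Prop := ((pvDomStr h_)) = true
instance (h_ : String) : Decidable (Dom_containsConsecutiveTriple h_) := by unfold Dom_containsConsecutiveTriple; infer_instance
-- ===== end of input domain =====

-- B replaces A's indexed sliding 3-window scan by a single run-length pass (same O(n) cost, plainer shape).


-- ===== PORT A =====
-- A's loop: for i in range(len(h)-2), c = h[i]; if h[i+1]==c and h[i+2]==c and c not in toReturn: append and return.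
def pvALoop (l : List Char) (i : Nat) (toReturn : List String) : List String :=
  if h : i + 2 < l.length then
    let c := l[i]
    if l[i+1]'(by omega) == c && l[i+2]'h == c && !(toReturn.contains (String.ofList [c])) then
      toReturn ++ [String.ofList [c]]
    else
      pvALoop l (i+1) toReturn
  else toReturn
termination_by l.length - i

def containsConsecutiveTriple (h_ : String) : List String :=
  pvALoop h_.toList 0 []

-- ===== PORT B =====
-- B's loop: for c in h, keep (prev, run); run reaching 3 returns [c].
def pvBLoop : List Char → Option Char → Nat → List String
  | [], _, _ => []
  | c :: rest, prev, run =>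
    let run' := if some c == prev then run + 1 else 1
    if run' == 3 then [String.ofList [c]] else pvBLoop rest (some c) run'

def containsConsecutiveTriple_alt (h_ : String) : List String :=
  pvBLoop h_.toList none 0

-- ===== PRECONDITION & SPEC =====
def Spec_containsConsecutiveTriple (h_ : String) (out : List String) : Prop := out = containsConsecutiveTriple_alt h_
instance (h_ : String) (out : List String) : Decidable (Spec_containsConsecutiveTriple h_ out) := by unfold Spec_containsConsecutiveTriple; infer_instance

-- ===== CLAIM (what is proved, stated in full; the proofs are below) =====
def Claim_equal_containsConsecutiveTriple : Prop := ∀ (h_ : String), Dom_containsConsecutiveTriple h_ → Spec_containsConsecutiveTriple h_ (containsConsecutiveTriple h_)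

-- ===== LEMMAS AND PROOFS =====

-- reference form: first triple of adjacent equal characters
def pvSpec : List Char → List String
  | a :: b :: c :: rest => if a == b && b == c then [String.ofList [a]] else pvSpec (b :: c :: rest)
  | _ => []

theorem pvSpec_short (t : List Char) (h : t.length ≤ 2) : pvSpec t = [] := by
  match t with
  | [] => rfl
  | [_] => rfl
  | [_, _] => rfl
  | _ :: _ :: _ :: _ => simp at h

theorem pvSpec_cons_ne (p c : Char) (t : List Char) (h : p ≠ c) :
    pvSpec (p :: c :: t) = pvSpec (c :: t) := by
  cases t with
  | nil => rfl
  | cons d r => simp [pvSpec, h]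

theorem pvALoop_eq_spec (l : List Char) (i : Nat) :
    pvALoop l i [] = pvSpec (l.drop i) := by
  by_cases h : i + 2 < l.length
  · have h1 : i < l.length := by omega
    have h2 : i + 1 < l.length := by omega
    have d0 : l.drop i = l[i] :: l.drop (i+1) := (List.getElem_cons_drop h1).symm
    have d1 : l.drop (i+1) = l[i+1] :: l.drop (i+2) := (List.getElem_cons_drop h2).symm
    have d2 : l.drop (i+2) = l[i+2] :: l.drop (i+3) := (List.getElem_cons_drop h).symm
    rw [pvALoop]
    simp only [h, dif_pos]
    have ih := pvALoop_eq_spec l (i+1)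
    rw [d1, d2] at ih
    rw [d0, d1, d2]
    simp only [pvSpec]
    split_ifs with hA hS hS
    · simp
    · simp at hA hS
      exact absurd (hA.1.trans hA.2.symm) (hS hA.1.symm)
    · simp at hA hS
      exact absurd (hS.2.symm.trans hS.1.symm) (hA hS.1.symm)
    · exact ih
  · rw [pvALoop]
    simp only [h, dif_neg, not_false_iff]
    rw [pvSpec_short _ (by simp; omega)]
termination_by l.length - i

theorem pvBLoop_runs (t : List Char) :
    (∀ p, pvBLoop t (some p) 1 = pvSpec (p :: t)) ∧
    (∀ p, pvBLoop t (some p) 2 = pvSpec (p :: p :: t)) := by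
  induction t with
  | nil => exact ⟨fun p => rfl, fun p => rfl⟩
  | cons c rest ih =>
    constructor
    · intro p
      by_cases hc : c = p
      · subst hc
        have step : pvBLoop (c :: rest) (some c) 1 = pvBLoop rest (some c) 2 := by
          simp [pvBLoop]
        rw [step, ih.2 c]
      · have step : pvBLoop (c :: rest) (some p) 1 = pvBLoop rest (some c) 1 := by
          simp [pvBLoop, hc]
        rw [step, ih.1 c, pvSpec_cons_ne p c rest (Ne.symm hc)]
    · intro p
      by_cases hc : c = p
      · subst hc
        have step : pvBLoop (c :: rest) (some c) 2 = [String.ofList [c]] := by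
          simp [pvBLoop]
        rw [step]; simp [pvSpec]
      · have step : pvBLoop (c :: rest) (some p) 2 = pvBLoop rest (some c) 1 := by
          simp [pvBLoop, hc]
        have sp : pvSpec (p :: p :: c :: rest) = pvSpec (p :: c :: rest) := by
          simp [pvSpec, Ne.symm hc]
        rw [step, ih.1 c, sp, pvSpec_cons_ne p c rest (Ne.symm hc)]

theorem pvBLoop_eq_spec (l : List Char) : pvBLoop l none 0 = pvSpec l := by
  cases l with
  | nil => rfl
  | cons c rest =>
    have step : pvBLoop (c :: rest) none 0 = pvBLoop rest (some c) 1 := by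
      simp [pvBLoop]
    rw [step]; exact (pvBLoop_runs rest).1 c

-- ===== VERDICT (by name: the statement is the Claim_ definition above) =====
theorem containsConsecutiveTriple_spec : Claim_equal_containsConsecutiveTriple := by
  intro h_ _
  unfold Spec_containsConsecutiveTriple containsConsecutiveTriple containsConsecutiveTriple_alt
  rw [pvALoop_eq_spec, pvBLoop_eq_spec, List.drop_zero]
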